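-- pv_equiv track=rewrite | github.com/jisha9584/CSE-231-Project-8 | proj08.py | find_max_friends
-- ===== SOURCE A (Python) =====
-- def find_max_friends(names_lst, friends_lst):
--     '''
--     Takes a list of names and the corresponding list of friends and determines who has the most friends.
--     names_lst: list of strings.
--     friends_lst: list of list of strings.
--     Returns: list of strings, int.
--     '''
--     max_frd = 0
--
--     for length in friends_lst:
--         friends_len = len(length)
--         if max_frd <= friends_len:
--             max_frd = friends_len
--
--     max_frds = []
--     for i, var in enumerate(friends_lst):
--         if len(var) == max_frd:
--             max_frds.append(names_lst[i])
--     my_tuple = (sorted(max_frds), max_frd)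
--     return my_tuple
-- ===== SOURCE B (Python) =====
-- def find_max_friends(names_lst, friends_lst):
--     best = 0
--     winners = []
--     for i, var in enumerate(friends_lst):
--         n = len(var)
--         if best < n:
--             best = n
--             winners = [names_lst[i]]
--         elif n == best:
--             winners.append(names_lst[i])
--     return (sorted(winners), best)
-- ===== Notes on version B (the rewrite author's own statement) =====
-- stated objective: alternative
-- what changed: Replaces A's two passes (first find the max friend count, then rescan collecting matching names) by a single pass that maintains the running maximum together with its current list of winners, resetting the list whenever a strictly larger count appears.
import Mathlib
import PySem

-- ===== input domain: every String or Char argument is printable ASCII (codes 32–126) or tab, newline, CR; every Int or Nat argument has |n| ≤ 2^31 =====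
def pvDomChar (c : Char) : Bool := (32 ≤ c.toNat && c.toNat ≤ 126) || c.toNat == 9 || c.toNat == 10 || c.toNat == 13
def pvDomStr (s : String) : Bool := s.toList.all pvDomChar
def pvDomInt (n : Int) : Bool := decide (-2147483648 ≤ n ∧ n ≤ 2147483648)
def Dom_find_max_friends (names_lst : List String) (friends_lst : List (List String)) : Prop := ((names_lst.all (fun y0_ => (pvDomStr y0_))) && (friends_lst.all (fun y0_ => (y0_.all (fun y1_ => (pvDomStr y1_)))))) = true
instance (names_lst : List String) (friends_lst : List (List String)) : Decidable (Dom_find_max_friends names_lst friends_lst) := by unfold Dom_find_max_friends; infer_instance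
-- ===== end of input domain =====

-- B replaces A's two passes (find the max count, then rescan for matching names) by one pass
-- keeping the running maximum with its current winner list; equivalence of return values is proved on
-- Pre_ (the inputs where Python A raises no IndexError); objective: alternative, same cost.


-- ===== PORT A =====
-- first loop of A: max_frd accumulator over friends_lst
def pvA_max (m : Int) : List (List String) → Int
  | [] => m
  | var :: rest =>
      let friends_len : Int := var.length
      pvA_max (if m ≤ friends_len then friends_len else m) rest

-- second loop of A: for i, var in enumerate(friends_lst): if len(var) == max_frd: append names_lst[i]
-- (names_lst[i] is pyGet?; outside Pre_ Python raises IndexError, the port uses .getD "" there — unclaimed)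
def pvA_collect (names_lst : List String) (max_frd : Int) (i : Int) : List (List String) → List String
  | [] => []
  | var :: rest =>
      (if (var.length : Int) = max_frd then [(PySem.List.pyGet? names_lst i).getD ""] else [])
        ++ pvA_collect names_lst max_frd (i + 1) rest

def find_max_friends (names_lst : List String) (friends_lst : List (List String)) : List String × Int :=
  let max_frd := pvA_max 0 friends_lst
  let max_frds := pvA_collect names_lst max_frd 0 friends_lst
  (PySem.List.sorted max_frds (fun x => x) false, max_frd)

-- ===== PORT B =====
-- single loop of B: running (best, winners); reset on a strictly larger count, append on a tie
def pvB_loop (names_lst : List String) (i best : Int) (winners : List String) :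
    List (List String) → Int × List String
  | [] => (best, winners)
  | var :: rest =>
      let n : Int := var.length
      if best < n then
        pvB_loop names_lst (i + 1) n [(PySem.List.pyGet? names_lst i).getD ""] rest
      else if n = best then
        pvB_loop names_lst (i + 1) best (winners ++ [(PySem.List.pyGet? names_lst i).getD ""]) rest
      else
        pvB_loop names_lst (i + 1) best winners rest

def find_max_friends_alt (names_lst : List String) (friends_lst : List (List String)) : List String × Int :=
  let st := pvB_loop names_lst 0 0 [] friends_lst
  (PySem.List.sorted st.2 (fun x => x) false, st.1)

-- ===== PRECONDITION & SPEC =====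
-- Pre_ excludes exactly the inputs on which Python A raises IndexError: some index whose friend list
-- has the maximal length lies beyond the end of names_lst.
def Pre_find_max_friends (names_lst : List String) (friends_lst : List (List String)) : Prop :=
  ∀ i : Nat, i < friends_lst.length →
    ((friends_lst.getD i []).length : Int) = (friends_lst.map (fun v => (v.length : Int))).foldr max 0 →
    i < names_lst.length
instance (names_lst : List String) (friends_lst : List (List String)) : Decidable (Pre_find_max_friends names_lst friends_lst) := by unfold Pre_find_max_friends; infer_instance

def pvWitness_find_max_friends : List String × List (List String) := (["bea", "al"], [["x"], ["y", "z"]])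

def Spec_find_max_friends (names_lst : List String) (friends_lst : List (List String)) (out : List String × Int) : Prop := out = find_max_friends_alt names_lst friends_lst
instance (names_lst : List String) (friends_lst : List (List String)) (out : List String × Int) : Decidable (Spec_find_max_friends names_lst friends_lst out) := by unfold Spec_find_max_friends; infer_instance

-- ===== CLAIM (what is proved, stated in full; the proofs are below) =====
def Claim_equal_find_max_friends : Prop := ∀ (names_lst : List String) (friends_lst : List (List String)), Dom_find_max_friends names_lst friends_lst → Pre_find_max_friends names_lst friends_lst → Spec_find_max_friends names_lst friends_lst (find_max_friends names_lst friends_lst)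

-- ===== LEMMAS AND PROOFS =====

-- A's max fold from seed a equals max of the seed and the fold from 0.
theorem pvA_max_eq_max (fs : List (List String)) : ∀ a : Int, 0 ≤ a →
    pvA_max a fs = max a (pvA_max 0 fs) := by
  induction fs with
  | nil => intro a ha; simp [pvA_max]; omega
  | cons v rest ih =>
      intro a ha
      have hv : (0 : Int) ≤ (v.length : Int) := by positivity
      have h1 : pvA_max (if a ≤ (v.length : Int) then (v.length : Int) else a) rest
          = max (max a (v.length : Int)) (pvA_max 0 rest) := by
        have : (if a ≤ (v.length : Int) then (v.length : Int) else a) = max a (v.length : Int) := by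
          split <;> omega
        rw [this]; exact ih _ (by omega)
      have h2 : pvA_max (if (0 : Int) ≤ (v.length : Int) then (v.length : Int) else 0) rest
          = max (v.length : Int) (pvA_max 0 rest) := by
        simp [hv]
        have := ih (v.length : Int) hv
        omega
      simp only [pvA_max, h1, h2]
      omega

theorem pvA_max_nonneg (fs : List (List String)) : 0 ≤ pvA_max 0 fs := by
  have := pvA_max_eq_max fs 0 le_rfl
  omega

-- main invariant: B's single pass equals A's max plus A's collection at the final max,
-- with the pending winners kept only when no strictly larger count remains.
theorem pvB_loop_eq (names_lst : List String) (fs : List (List String)) :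
    ∀ (i b : Int) (w : List String), 0 ≤ b →
      pvB_loop names_lst i b w fs =
        (pvA_max b fs,
          (if b < pvA_max 0 fs then [] else w) ++ pvA_collect names_lst (pvA_max b fs) i fs) := by
  induction fs with
  | nil =>
      intro i b w hb
      simp [pvB_loop, pvA_max, pvA_collect]
      intro h; omega
  | cons var rest ih =>
      intro i b w hb
      have hn : (0 : Int) ≤ (var.length : Int) := by positivity
      have hMr := pvA_max_nonneg rest
      have hmx : ∀ a : Int, 0 ≤ a → pvA_max a rest = max a (pvA_max 0 rest) :=
        fun a ha => pvA_max_eq_max rest a ha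
      by_cases h1 : b < (var.length : Int)
      · -- reset branch
        have hseed : (if b ≤ (var.length : Int) then (var.length : Int) else b) = (var.length : Int) := by
          split <;> omega
        rw [show pvB_loop names_lst i b w (var :: rest)
              = pvB_loop names_lst (i+1) (var.length : Int)
                  [(PySem.List.pyGet? names_lst i).getD ""] rest by simp [pvB_loop, h1]]
        rw [ih (i+1) (var.length : Int) _ hn]
        have hM : pvA_max b (var :: rest) = pvA_max (var.length : Int) rest := by
          simp [pvA_max, hseed]
        have hM0 : pvA_max 0 (var :: rest) = pvA_max (var.length : Int) rest := by
          simp [pvA_max]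
        have hMbig : b < pvA_max (var.length : Int) rest := by
          have := hmx (var.length : Int) hn; omega
        rw [Prod.mk.injEq]
        refine ⟨by rw [hM], ?_⟩
        rw [hM, hM0]
        simp only [hMbig, if_pos, List.nil_append]
        have heq : ((var.length : Int) = pvA_max (var.length : Int) rest)
            ↔ ¬ ((var.length : Int) < pvA_max 0 rest) := by
          have := hmx (var.length : Int) hn; constructor <;> intro hh <;> omega
        by_cases h2 : (var.length : Int) < pvA_max 0 rest
        · have hne : ¬ ((var.length : Int) = pvA_max (var.length : Int) rest) := by
            rw [heq]; simp [h2]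
          rw [if_pos h2]
          simp only [pvA_collect]
          rw [if_neg hne, List.nil_append]
        · have hEq : (var.length : Int) = pvA_max (var.length : Int) rest := heq.mpr h2
          rw [if_neg h2]
          simp only [pvA_collect]
          rw [if_pos hEq]
      · by_cases h2 : (var.length : Int) = b
        · -- tie branch
          have hseed : (if b ≤ (var.length : Int) then (var.length : Int) else b) = b := by
            split <;> omega
          rw [show pvB_loop names_lst i b w (var :: rest)
                = pvB_loop names_lst (i+1) b
                    (w ++ [(PySem.List.pyGet? names_lst i).getD ""]) rest by
              simp [pvB_loop, h2]]
          rw [ih (i+1) b _ hb]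
          have hM : pvA_max b (var :: rest) = pvA_max b rest := by simp [pvA_max, hseed]
          have hM0 : pvA_max 0 (var :: rest) = pvA_max b rest := by
            simp [pvA_max]; rw [h2]
          rw [Prod.mk.injEq]
          refine ⟨by rw [hM], ?_⟩
          rw [hM, hM0]
          have hMb := hmx b hb
          by_cases h3 : b < pvA_max 0 rest
          · have hbne : ¬ ((var.length : Int) = pvA_max b rest) := by omega
            have hbl : b < pvA_max b rest := by omega
            simp [pvA_collect, hbne, h3, hbl]
          · have hbeq : (var.length : Int) = pvA_max b rest := by omega
            have hnl : ¬ b < pvA_max b rest := by omega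
            simp [pvA_collect, hbeq, h3, hnl]
        · -- skip branch: n < b
          have hlt : (var.length : Int) < b := by omega
          have hseed : (if b ≤ (var.length : Int) then (var.length : Int) else b) = b := by
            split <;> omega
          rw [show pvB_loop names_lst i b w (var :: rest)
                = pvB_loop names_lst (i+1) b w rest by simp [pvB_loop, h1, h2]]
          rw [ih (i+1) b _ hb]
          have hM : pvA_max b (var :: rest) = pvA_max b rest := by simp [pvA_max, hseed]
          have hM0 : pvA_max 0 (var :: rest) = pvA_max (var.length : Int) rest := by
            simp [pvA_max]
          rw [Prod.mk.injEq]
          refine ⟨by rw [hM], ?_⟩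
          rw [hM, hM0]
          have hMb := hmx b hb
          have hMn := hmx (var.length : Int) hn
          have hcond : (b < pvA_max (var.length : Int) rest) ↔ (b < pvA_max 0 rest) := by omega
          have hne : ¬ ((var.length : Int) = pvA_max b rest) := by omega
          by_cases h3 : b < pvA_max 0 rest
          · simp [pvA_collect, hne, h3, hcond.mpr h3]
          · have : ¬ b < pvA_max (var.length : Int) rest := by omega
            simp [pvA_collect, hne, h3, this]

-- ===== VERDICT (by name: the statement is the Claim_ definition above) =====
theorem find_max_friends_spec : Claim_equal_find_max_friends := by
  intro names_lst friends_lst _ _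
  unfold Spec_find_max_friends find_max_friends find_max_friends_alt
  rw [pvB_loop_eq names_lst friends_lst 0 0 [] le_rfl]
  simp
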